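-- pv_equiv track=rewrite | github.com/CameronImmesoete/Pascal | pascal.py | PascalHelper
-- ===== SOURCE A (Python) =====
-- def PascalHelper(n):
--   current = [1]
--   last = [1]
--   for countHeight in range(n + 1):
--     last = current
--     current = [1]
--     for countWidth in range(1, len(last)):
--       current += [last[countWidth - 1] + last[countWidth]]
--     if countHeight > 0 and countHeight % 2 == 0:
--       current += [last[len(last) - 1] * 2]
--   return current
-- ===== SOURCE B (Python) =====
-- def PascalHelper(n):
--     row = [1]
--     c = 1
--     for k in range(1, n // 2 + 1):
--         c = c * (n - k + 1) // k
--         row.append(c)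
--     return row
-- ===== Notes on version B (the rewrite author's own statement) =====
-- stated objective: faster
-- what changed: Instead of building all rows of Pascal's triangle iteratively (n outer iterations each rebuilding the half-row), B computes the half-row directly with the multiplicative binomial recurrence c = c*(n-k+1)//k for k = 1..n//2.
import Mathlib
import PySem

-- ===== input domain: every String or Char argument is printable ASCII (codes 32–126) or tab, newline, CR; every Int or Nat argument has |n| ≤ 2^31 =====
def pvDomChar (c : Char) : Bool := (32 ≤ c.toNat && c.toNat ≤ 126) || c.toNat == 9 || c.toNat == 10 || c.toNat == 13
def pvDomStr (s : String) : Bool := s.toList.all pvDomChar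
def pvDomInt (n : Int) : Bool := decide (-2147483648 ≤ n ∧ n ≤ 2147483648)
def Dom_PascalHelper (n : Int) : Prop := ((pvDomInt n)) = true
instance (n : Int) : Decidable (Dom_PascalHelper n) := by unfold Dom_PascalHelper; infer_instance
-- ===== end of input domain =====

-- B computes the half-row directly by the multiplicative binomial recurrence (O(n))
-- instead of A's row-by-row construction of Pascal's triangle (O(n^2)).

-- ===== PORT A =====
-- one outer-loop iteration of A: last = current; rebuild current; maybe append the middle element
def pascalStepA (st : List Int × List Int) (countHeight : Int) : List Int × List Int :=
  let last := st.1
  let current : List Int :=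
    (PySem.List.pyRange 1 (last.length : Int) 1).foldl
      (fun cur countWidth =>
        cur ++ [PySem.List.pyGetD last (countWidth - 1) 0 + PySem.List.pyGetD last countWidth 0])
      [1]
  let current :=
    if countHeight > 0 ∧ PySem.Int.mod countHeight 2 = 0 then
      current ++ [PySem.List.pyGetD last ((last.length : Int) - 1) 0 * 2]
    else current
  (current, last)

def PascalHelper (n : Int) : List Int :=
  ((PySem.List.pyRange 0 (n + 1) 1).foldl pascalStepA ([1], [1])).1

-- ===== PORT B =====
def pascalStepB (n : Int) (st : List Int × Int) (k : Int) : List Int × Int :=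
  let c := PySem.Int.floordiv (st.2 * (n - k + 1)) k
  (st.1 ++ [c], c)

def PascalHelper_alt (n : Int) : List Int :=
  ((PySem.List.pyRange 1 (PySem.Int.floordiv n 2 + 1) 1).foldl (pascalStepB n) ([1], 1)).1

-- ===== PRECONDITION & SPEC =====
def Spec_PascalHelper (n : Int) (out : List Int) : Prop := out = PascalHelper_alt n
instance (n : Int) (out : List Int) : Decidable (Spec_PascalHelper n out) := by unfold Spec_PascalHelper; infer_instance

-- ===== CLAIM (what is proved, stated in full; the proofs are below) =====
def Claim_equal_PascalHelper : Prop := ∀ (n : Int), Dom_PascalHelper n → Spec_PascalHelper n (PascalHelper n)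

-- ===== LEMMAS AND PROOFS =====

-- the intended value: the first half of Pascal's row m
def halfRow (m : Nat) : List Int :=
  (List.range (m / 2 + 1)).map (fun k => ((m.choose k : Nat) : Int))

theorem halfRow_length (h : Nat) : (halfRow h).length = h / 2 + 1 := by
  simp [halfRow]

theorem halfRow_getD (h k : Nat) (hk : k < h / 2 + 1) :
    (halfRow h).getD k 0 = ((h.choose k : Nat) : Int) := by
  simp [halfRow, List.getD_eq_getElem?_getD, hk]

theorem half_succ_even (h : Nat) (heven : h % 2 = 0) :
    halfRow (h + 1) =
      1 :: (List.range (h / 2)).map (fun k : Nat => (((h + 1).choose (k + 1) : Nat) : Int)) := by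
  rw [halfRow, show (h + 1) / 2 + 1 = h / 2 + 1 from by omega,
      List.range_succ_eq_map, List.map_cons, List.map_map]
  simp [Function.comp]

theorem half_succ_odd (h : Nat) (hodd : h % 2 = 1) :
    halfRow (h + 1) =
      1 :: (List.range (h / 2)).map (fun k : Nat => (((h + 1).choose (k + 1) : Nat) : Int))
        ++ [((h.choose (h / 2) : Nat) : Int) * 2] := by
  have hmid : (h + 1).choose (h / 2 + 1) = h.choose (h / 2) * 2 := by
    have hsym : h.choose (h / 2 + 1) = h.choose (h / 2) := by
      have hs := Nat.choose_symm (Nat.div_le_self h 2)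
      rw [show h - h / 2 = h / 2 + 1 from by omega] at hs
      exact hs
    rw [Nat.choose_succ_succ, hsym]
    omega
  rw [halfRow, show (h + 1) / 2 + 1 = (h / 2 + 1) + 1 from by omega,
      List.range_succ, List.map_append, List.range_succ_eq_map, List.map_cons, List.map_map]
  simp [Function.comp, hmid]

theorem stepA_spec (h : Nat) (last : List Int) :
    pascalStepA (halfRow h, last) ((h : Int) + 1) = (halfRow (h + 1), halfRow h) := by
  have hlen : (((halfRow h).length : Nat) : Int) = ((h / 2 + 1 : Nat) : Int) := by
    rw [halfRow_length]
  have hmod : PySem.Int.mod ((h : Int) + 1) 2 = (((h + 1) % 2 : Nat) : Int) := by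
    rw [PySem.Int.mod_eq_emod_of_pos (by omega)]; omega
  simp only [pascalStepA]
  rw [hlen, PySem.List.foldl_append_singleton_eq_map, PySem.List.pyRange_one]
  rw [show ((((h / 2 + 1 : Nat) : Int)) - 1).toNat = h / 2 from by omega]
  rw [List.map_map]
  have hmap : (List.range (h / 2)).map
        ((fun cw => PySem.List.pyGetD (halfRow h) (cw - 1) 0 + PySem.List.pyGetD (halfRow h) cw 0)
          ∘ (fun k : Nat => (1 : Int) + (k : Int))) =
      (List.range (h / 2)).map (fun k : Nat => (((h + 1).choose (k + 1) : Nat) : Int)) := by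
    refine List.map_congr_left (fun k hk => ?_)
    have hk' : k < h / 2 := List.mem_range.mp hk
    have e1 : (1 : Int) + (k : Int) - 1 = ((k : Nat) : Int) := by omega
    have e2 : (1 : Int) + (k : Int) = ((k + 1 : Nat) : Int) := by omega
    simp only [Function.comp_apply]
    rw [e1, e2, PySem.List.pyGetD_natCast, PySem.List.pyGetD_natCast,
        halfRow_getD h k (by omega), halfRow_getD h (k + 1) (by omega)]
    exact_mod_cast (Nat.choose_succ_succ h k).symm
  rw [hmap]
  by_cases hpar : (h + 1) % 2 = 0
  · -- h odd: the middle element is appended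
    have hodd : h % 2 = 1 := by omega
    rw [if_pos ⟨by omega, by rw [hmod]; exact_mod_cast hpar⟩]
    rw [show (((h / 2 + 1 : Nat) : Int)) - 1 = ((h / 2 : Nat) : Int) from by push_cast; ring,
        PySem.List.pyGetD_natCast, halfRow_getD h (h / 2) (by omega), half_succ_odd h hodd]
    simp
  · -- h even: no middle element
    rw [if_neg (by rintro ⟨-, hm⟩; rw [hmod] at hm; exact hpar (by exact_mod_cast hm))]
    rw [half_succ_even h (by omega)]
    simp

theorem A_spec (h : Nat) :
    (PySem.List.pyRange 0 ((h : Int) + 1) 1).foldl pascalStepA ([1], [1]) =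
      (halfRow h, if h = 0 then [1] else halfRow (h - 1)) := by
  induction h with
  | zero =>
      simp only [Nat.cast_zero]
      decide
  | succ m ih =>
      rw [show ((m + 1 : Nat) : Int) + 1 = ((m : Int) + 1) + 1 by push_cast; ring,
          PySem.List.pyRange_one_succ_right (by omega : (0 : Int) ≤ (m : Int) + 1),
          List.foldl_append, ih]
      simp only [List.foldl_cons, List.foldl_nil]
      rw [stepA_spec m _]
      simp

theorem B_spec (m : Nat) (j : Nat) (hj : j ≤ m / 2) :
    (PySem.List.pyRange 1 ((j : Int) + 1) 1).foldl (pascalStepB (m : Int)) ([1], 1) =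
      ((List.range (j + 1)).map (fun k => ((m.choose k : Nat) : Int)), ((m.choose j : Nat) : Int)) := by
  induction j with
  | zero =>
      rw [show ((0 : Nat) : Int) + 1 = 1 by norm_num, PySem.List.pyRange_one_eq_nil le_rfl]
      simp
  | succ i ih =>
      have hi : i ≤ m / 2 := by omega
      have hkm : i < m := by omega
      rw [show ((i + 1 : Nat) : Int) + 1 = ((i : Int) + 1) + 1 by push_cast; ring,
          PySem.List.pyRange_one_succ_right (by omega : (1 : Int) ≤ (i : Int) + 1),
          List.foldl_append, ih hi]
      simp only [List.foldl_cons, List.foldl_nil, pascalStepB]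
      have hc : ((m.choose i : Nat) : Int) * ((m : Int) - ((i : Int) + 1) + 1) =
          ((m.choose (i + 1) : Nat) : Int) * ((i : Int) + 1) := by
        have := Nat.choose_succ_right_eq m i
        have hsub : ((m - i : Nat) : Int) = (m : Int) - (i : Int) := by
          push_cast [Nat.cast_sub (le_of_lt hkm)]; ring
        calc ((m.choose i : Nat) : Int) * ((m : Int) - ((i : Int) + 1) + 1)
            = ((m.choose i * (m - i) : Nat) : Int) := by push_cast [hsub]; ring
          _ = ((m.choose (i + 1) * (i + 1) : Nat) : Int) := by rw [← this]
          _ = ((m.choose (i + 1) : Nat) : Int) * ((i : Int) + 1) := by push_cast; ring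
      have hdiv : PySem.Int.floordiv (((m.choose i : Nat) : Int) * ((m : Int) - ((i : Int) + 1) + 1)) ((i : Int) + 1)
          = ((m.choose (i + 1) : Nat) : Int) := by
        rw [hc, PySem.Int.floordiv_eq_ediv_of_pos (by omega)]
        exact Int.mul_ediv_cancel _ (by omega)
      simp only [hdiv]
      rw [show List.range (i + 1 + 1) = List.range (i + 1) ++ [i + 1] from List.range_succ,
          List.map_append]
      simp

-- ===== VERDICT (by name: the statement is the Claim_ definition above) =====
theorem PascalHelper_spec : Claim_equal_PascalHelper := by
  intro n _
  unfold Spec_PascalHelper PascalHelper PascalHelper_alt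
  by_cases hn : 0 ≤ n
  · obtain ⟨m, rfl⟩ := Int.eq_ofNat_of_zero_le hn
    rw [A_spec m]
    rw [show PySem.Int.floordiv (m : Int) 2 = ((m / 2 : Nat) : Int) from
      by exact_mod_cast PySem.Int.floordiv_natCast m 2]
    rw [B_spec m (m / 2) le_rfl]
    simp [halfRow]
  · have h1 : n + 1 ≤ 0 := by omega
    have h2 : PySem.Int.floordiv n 2 + 1 ≤ 1 := by
      have := PySem.Int.floordiv_lt_iff_lt_mul (a := n) (b := 2) (q := 0) (by omega)
      omega
    rw [PySem.List.pyRange_one_eq_nil h1, PySem.List.pyRange_one_eq_nil h2]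
    simp
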